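-- pv_equiv track=rewrite | github.com/nicolay-r/Reasoning-for-Radiology-Report-Evaluation | presets/issue87/schemas/utils.py | manual_terms_split
-- ===== SOURCE A (Python) =====
-- def manual_terms_split(line, separators=None, clean_comma=True, clean_brackets=True):
--     # Several reports might be taken in brackets.
--     if clean_brackets:
--         if len(line) > 0 and line[0] == '(' and line[-1] == ')':
--             line = line[1:-1]
--
--     separators = [' ', '_', '/'] if separators is None else separators
--     entries = []
--
--     # Assessing frequency of separator appearances.
--     template = ""
--     while len(line) > 0 and template is not None:
--
--         template = None
--         min_ind = len(line) + 1
--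
--         for s in separators:
--             if s in line:
--                 entry_ind = min(min_ind, line.index(s))
--                 if entry_ind < min_ind:
--                     template = s
--                     min_ind = entry_ind
--
--         if template is None:
--             break
--
--         entries.append(line[:min_ind])
--         line = line[min_ind + len(template):]
--
--     if len(line) > 0:
--         entries.append(line[:min_ind])
--
--     # clean empty entries.
--     entries = [e for e in entries if len(e) > 0]
--
--     # optionally clean commas in the end.
--     if clean_comma:
--         entries = [e[:-1] if e[-1] == ',' else e for e in entries]
--
--     return entries
-- ===== SOURCE B (Python) =====
-- def manual_terms_split(line, separators=None, clean_comma=True, clean_brackets=True):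
--     # Single left-to-right scan: at each position try separators in list order
--     # (earliest match wins; list order breaks ties), instead of recomputing
--     # line.index for every separator on every cut.
--     if clean_brackets:
--         if len(line) > 0 and line[0] == '(' and line[-1] == ')':
--             line = line[1:-1]
--
--     seps = [' ', '_', '/'] if separators is None else separators
--
--     tokens = []
--     cur = []
--     i = 0
--     n = len(line)
--     while i < n:
--         hit = next((s for s in seps if s and line.startswith(s, i)), None)
--         if hit is None:
--             cur.append(line[i])
--             i += 1
--         else:
--             tokens.append(''.join(cur))
--             cur = []
--             i += len(hit)
--     tokens.append(''.join(cur))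
--
--     out = [t for t in tokens if len(t) > 0]
--     if clean_comma:
--         out = [t[:-1] if t[-1] == ',' else t for t in out]
--     return out
-- ===== Notes on version B (the rewrite author's own statement) =====
-- stated objective: alternative
-- what changed: Replaces the repeated min-over-line.index rescans of the shrinking remainder with one left-to-right scan that tries each separator at the current position (first-in-list tie-break), so each character is visited once per pass.
-- outside the precondition, e.g. on manual_terms_split('a b', [''], True, True): A does not finish within the time limit, B returns ['a b']; on manual_terms_split('aa', ['a', ''], True, True): A returns [], B returns []
import Mathlib
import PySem

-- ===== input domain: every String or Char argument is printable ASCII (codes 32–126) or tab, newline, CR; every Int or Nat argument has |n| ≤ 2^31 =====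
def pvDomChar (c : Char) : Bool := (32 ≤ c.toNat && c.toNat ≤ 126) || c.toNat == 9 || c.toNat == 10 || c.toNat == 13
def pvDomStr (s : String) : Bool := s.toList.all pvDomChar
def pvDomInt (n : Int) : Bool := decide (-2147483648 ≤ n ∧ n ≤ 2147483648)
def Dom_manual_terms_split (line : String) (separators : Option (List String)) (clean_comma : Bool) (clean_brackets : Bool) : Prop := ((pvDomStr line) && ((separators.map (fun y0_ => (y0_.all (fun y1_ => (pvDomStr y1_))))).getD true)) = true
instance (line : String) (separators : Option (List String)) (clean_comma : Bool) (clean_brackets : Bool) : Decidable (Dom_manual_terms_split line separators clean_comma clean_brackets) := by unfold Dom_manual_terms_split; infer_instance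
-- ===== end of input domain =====

-- B replaces A's repeated min-over-line.index rescans of the shrinking remainder by one
-- left-to-right scan trying each separator at the current position (objective: alternative).


-- ===== PORT A =====
-- the body of A's `for s in separators` loop, acc = (template, min_ind)
def pvAStep (line : List Char) (acc : Option (List Char) × Nat) (s : List Char) : Option (List Char) × Nat :=
  if PySem.Chars.isIn s line then
    -- entry_ind = min(min_ind, line.index(s)); `s in line` guards, so find ≥ 0
    let entry_ind := min acc.2 (PySem.Chars.find line s).toNat
    if entry_ind < acc.2 then (some s, entry_ind) else acc
  else acc

-- A's inner for-loop: template = None; min_ind = len(line) + 1; for s in separators: …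
def pvAFind (seps : List (List Char)) (line : List Char) : Option (List Char) × Nat :=
  seps.foldl (pvAStep line) (none, line.length + 1)

-- A's while-loop; fuel only makes the recursion total (line.length+1 always suffices under Pre_);
-- returns (entries, line, min_ind) as left when the loop stops (template None = break).
def pvALoop (seps : List (List Char)) : Nat → List Char → List (List Char) → Nat → List (List Char) × List Char × Nat
  | 0, line, entries, min_ind => (entries, line, min_ind)
  | fuel+1, line, entries, min_ind =>
    if line.length > 0 then
      match pvAFind seps line with
      | (none, m) => (entries, line, m)        -- template is None: break
      | (some tpl, m) =>
          pvALoop seps fuel (line.drop (m + tpl.length)) (entries ++ [line.take m]) m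
    else (entries, line, min_ind)

-- "if len(line) > 0: entries.append(line[:min_ind])" after the loop
def pvAFinish (r : List (List Char) × List Char × Nat) : List (List Char) :=
  if r.2.1.length > 0 then r.1 ++ [r.2.1.take r.2.2] else r.1

def manual_terms_split (line : String) (separators : Option (List String)) (clean_comma : Bool) (clean_brackets : Bool) : List String :=
  let cs0 := line.toList
  let cs := if clean_brackets then
      (if cs0.length > 0 ∧ PySem.List.pyGet? cs0 0 = some '(' ∧ PySem.List.pyGet? cs0 (-1) = some ')'
       then PySem.List.slice cs0 (some 1) (some (-1)) else cs0)
    else cs0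
  let seps := (match separators with | none => [" ", "_", "/"] | some l => l).map String.toList
  let entries := pvAFinish (pvALoop seps (cs.length + 1) cs [] 0)
  let entries := entries.filter (fun e => decide (e.length > 0))
  let entries := if clean_comma then
      entries.map (fun e => if PySem.List.pyGet? e (-1) = some ',' then PySem.List.slice e none (some (-1)) else e)
    else entries
  entries.map (fun e => String.ofList e)

-- ===== PORT B =====
-- first separator (in list order) that is nonempty and matches at the current position
def pvBMatch (seps : List (List Char)) (rest : List Char) : Option (List Char) :=
  seps.find? (fun s => !s.isEmpty && PySem.Chars.startswith rest s)

theorem pvBMatch_some_ne {seps : List (List Char)} {rest s : List Char} (h : pvBMatch seps rest = some s) : s ≠ [] := by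
  have := List.find?_some h
  simp only [Bool.and_eq_true, Bool.not_eq_true'] at this
  simpa [List.isEmpty_iff] using this.1

-- B's scan: cur is the characters of the token being built, rest the unread remainder
def pvBScan (seps : List (List Char)) : List Char → List Char → List (List Char)
  | cur, [] => [cur]
  | cur, c :: rs =>
    match h : pvBMatch seps (c :: rs) with
    | some s => cur :: pvBScan seps [] ((c :: rs).drop s.length)
    | none => pvBScan seps (cur ++ [c]) rs
  termination_by _ rest => rest.length
  decreasing_by
    · have h1 : 1 ≤ s.length := List.length_pos_iff.mpr (pvBMatch_some_ne h)
      simp only [List.length_drop, List.length_cons]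
      omega
    · simp

def manual_terms_split_alt (line : String) (separators : Option (List String)) (clean_comma : Bool) (clean_brackets : Bool) : List String :=
  let cs0 := line.toList
  let cs := if clean_brackets then
      (if cs0.length > 0 ∧ PySem.List.pyGet? cs0 0 = some '(' ∧ PySem.List.pyGet? cs0 (-1) = some ')'
       then PySem.List.slice cs0 (some 1) (some (-1)) else cs0)
    else cs0
  let seps := (match separators with | none => [" ", "_", "/"] | some l => l).map String.toList
  let out := (pvBScan seps [] cs).filter (fun t => decide (t.length > 0))
  let out := if clean_comma then
      out.map (fun t => if PySem.List.pyGet? t (-1) = some ',' then PySem.List.slice t none (some (-1)) else t)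
    else out
  out.map (fun t => String.ofList t)

-- ===== PRECONDITION & SPEC =====
-- Pre_ excludes only explicit separator lists containing the empty string: A's while-loop
-- diverges as soon as the empty separator is selected (it consumes nothing), and on the
-- remaining such inputs, where an earlier separator always wins, A returns B's value anyway.
def Pre_manual_terms_split (line : String) (separators : Option (List String)) (clean_comma : Bool) (clean_brackets : Bool) : Prop :=
  ∀ s ∈ separators.getD [], s ≠ ""
instance (line : String) (separators : Option (List String)) (clean_comma : Bool) (clean_brackets : Bool) : Decidable (Pre_manual_terms_split line separators clean_comma clean_brackets) := by unfold Pre_manual_terms_split; infer_instance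

def pvWitness_manual_terms_split : String × Option (List String) × Bool × Bool := ("(a b_cd,)", some [" ", "_"], true, true)

def Spec_manual_terms_split (line : String) (separators : Option (List String)) (clean_comma : Bool) (clean_brackets : Bool) (out : List String) : Prop := out = manual_terms_split_alt line separators clean_comma clean_brackets
instance (line : String) (separators : Option (List String)) (clean_comma : Bool) (clean_brackets : Bool) (out : List String) : Decidable (Spec_manual_terms_split line separators clean_comma clean_brackets out) := by unfold Spec_manual_terms_split; infer_instance

-- ===== CLAIM (what is proved, stated in full; the proofs are below) =====
def Claim_equal_manual_terms_split : Prop := ∀ (line : String) (separators : Option (List String)) (clean_comma : Bool) (clean_brackets : Bool), Dom_manual_terms_split line separators clean_comma clean_brackets → Pre_manual_terms_split line separators clean_comma clean_brackets → Spec_manual_terms_split line separators clean_comma clean_brackets (manual_terms_split line separators clean_comma clean_brackets)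

-- ===== LEMMAS AND PROOFS =====

-- if find l s = k is witnessed by a first occurrence at k, then find really is k
theorem pv_find_eq {l s : List Char} {k : Nat} (hpre : s <+: l.drop k)
    (hmin : ∀ i < k, ¬ s <+: l.drop i) : PySem.Chars.find l s = (k : Int) := by
  have hin : PySem.Chars.isIn s l = true := (PySem.Chars.exists_prefix_drop_iff_isIn _ _).mp ⟨k, hpre⟩
  have hnn : 0 ≤ PySem.Chars.find l s := (PySem.Chars.find_nonneg_iff _ _).mpr ((PySem.Chars.isIn_iff_infix _ _).mp hin)
  obtain ⟨hp, hm⟩ := PySem.Chars.find_spec hnn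
  rcases Nat.lt_trichotomy (PySem.Chars.find l s).toNat k with h | h | h
  · exact absurd hp (hmin _ h)
  · omega
  · exact absurd hpre (hm k h)
theorem pvAStep_fix0 (line : List Char) (sp : List (List Char)) (acc : Option (List Char) × Nat)
    (h : acc.2 = 0) : List.foldl (pvAStep line) acc sp = acc := by
  induction sp generalizing acc with
  | nil => rfl
  | cons s sp ih =>
      have hstep : pvAStep line acc s = acc := by
        simp only [pvAStep, h]
        split <;> simp
      rw [List.foldl_cons, hstep, ih _ h]

-- folding over separators none of which occurs in `line` changes nothing
theorem pvAStep_skip (line : List Char) (sp : List (List Char)) (acc : Option (List Char) × Nat)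
    (h : ∀ s ∈ sp, PySem.Chars.isIn s line = false) : List.foldl (pvAStep line) acc sp = acc := by
  induction sp generalizing acc with
  | nil => rfl
  | cons s sp ih =>
      have hstep : pvAStep line acc s = acc := by
        simp [pvAStep, h s (by simp)]
      rw [List.foldl_cons, hstep, ih _ (fun t ht => h t (by simp [ht]))]

theorem pvAStep_some_stays (line : List Char) (sp : List (List Char)) (acc : Option (List Char) × Nat)
    (h : acc.1.isSome) : (List.foldl (pvAStep line) acc sp).1.isSome := by
  induction sp generalizing acc with
  | nil => exact h
  | cons s sp ih =>
      rw [List.foldl_cons]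
      refine ih _ ?_
      simp only [pvAStep]
      split
      · split
        · simp
        · exact h
      · exact h

theorem pvAFind_none (seps : List (List Char)) (line : List Char)
    (h : (pvAFind seps line).1 = none) : ∀ s ∈ seps, PySem.Chars.isIn s line = false := by
  unfold pvAFind at h
  induction seps with
  | nil => simp
  | cons s sp ih =>
      rw [List.foldl_cons] at h
      by_cases hin : PySem.Chars.isIn s line = true
      · exfalso
        have hle : (PySem.Chars.find line s).toNat ≤ line.length := by
          have := PySem.Chars.find_le_length (s := line) (sub := s)
          omega
        have hstep : pvAStep line (none, line.length + 1) s
            = (some s, min (line.length + 1) (PySem.Chars.find line s).toNat) := by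
          simp only [pvAStep, hin, if_true]
          have : min (line.length + 1) (PySem.Chars.find line s).toNat < line.length + 1 := by omega
          simp [this]
        rw [hstep] at h
        have h2 := pvAStep_some_stays line sp
          (some s, min (line.length + 1) (PySem.Chars.find line s).toNat) (by simp)
        rw [h] at h2
        simp at h2
      · intro t ht
        rcases List.mem_cons.mp ht with rfl | ht'
        · simpa using hin
        · have hstep : pvAStep line (none, line.length + 1) s = (none, line.length + 1) := by
            simp [pvAStep, Bool.eq_false_iff.mpr hin]
          rw [hstep] at h
          exact ih h t ht'

theorem pvAFind_all_none (seps : List (List Char)) (line : List Char)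
    (h : ∀ s ∈ seps, PySem.Chars.isIn s line = false) :
    pvAFind seps line = (none, line.length + 1) := by
  unfold pvAFind
  exact pvAStep_skip line seps _ h

-- a match at position 0 makes A's inner loop return it with index 0
theorem pvAFind_head {seps : List (List Char)} {line tpl : List Char}
    (hs : ∀ s ∈ seps, s ≠ []) (h : pvBMatch seps line = some tpl) :
    pvAFind seps line = (some tpl, 0) := by
  obtain ⟨hp, pre, post, rfl, hpre⟩ := List.find?_eq_some_iff_append.mp h
  simp only [Bool.and_eq_true, Bool.not_eq_true'] at hp
  have htpl : tpl <+: line := (PySem.Chars.startswith_iff _ _).mp hp.2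
  -- over pre the accumulator's min_ind stays ≥ 1
  have hge1 : ∀ (sp : List (List Char)) (acc : Option (List Char) × Nat),
      (∀ s ∈ sp, ¬ s <+: line) → 1 ≤ acc.2 → 1 ≤ (List.foldl (pvAStep line) acc sp).2 := by
    intro sp
    induction sp with
    | nil => intro acc _ h1; exact h1
    | cons s sp ih =>
        intro acc hnp h1
        rw [List.foldl_cons]
        refine ih _ (fun t ht => hnp t (by simp [ht])) ?_
        simp only [pvAStep]
        split
        · rename_i hin
          split
          · rename_i hlt
            have hnn : 0 ≤ PySem.Chars.find line s :=
              (PySem.Chars.find_nonneg_iff _ _).mpr ((PySem.Chars.isIn_iff_infix _ _).mp hin)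
            obtain ⟨hpf, _⟩ := PySem.Chars.find_spec hnn
            have : (PySem.Chars.find line s).toNat ≠ 0 := by
              intro h0
              rw [h0] at hpf
              exact hnp s (by simp) (by simpa using hpf)
            show 1 ≤ min acc.2 (PySem.Chars.find line s).toNat
            omega
          · exact h1
        · exact h1
  unfold pvAFind
  rw [List.foldl_append]
  have hprelt : ∀ s ∈ pre, ¬ s <+: line := by
    intro s hsmem hsp
    have hsne : s ≠ [] := hs s (by simp [hsmem])
    have hf := hpre s hsmem
    have htrue : (!s.isEmpty && PySem.Chars.startswith line s) = true := by
      simp [List.isEmpty_iff, hsne, (PySem.Chars.startswith_iff _ _).mpr hsp]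
    simp [htrue] at hf
  have hacc1 : 1 ≤ (List.foldl (pvAStep line) (none, line.length + 1) pre).2 :=
    hge1 pre _ hprelt (by omega)
  rw [List.foldl_cons]
  have hintpl : PySem.Chars.isIn tpl line = true :=
    (PySem.Chars.exists_prefix_drop_iff_isIn _ _).mp ⟨0, by simpa using htpl⟩
  have hfind0 : PySem.Chars.find line tpl = (0 : Int) :=
    pv_find_eq (k := 0) (by simpa using htpl) (fun i hi => absurd hi (by omega))
  have hstep : pvAStep line (List.foldl (pvAStep line) (none, line.length + 1) pre) tpl = (some tpl, 0) := by
    simp only [pvAStep, hintpl, if_true, hfind0]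
    have hmin : min (List.foldl (pvAStep line) (none, line.length + 1) pre).2 (Int.toNat 0) = 0 := by omega
    rw [hmin]
    simp [Nat.lt_of_lt_of_le Nat.zero_lt_one hacc1]
  rw [hstep, pvAStep_fix0 _ _ _ rfl]

-- no match at position 0: A's inner loop on c :: rs is its result on rs, index shifted by one
theorem pvAFind_tail {seps : List (List Char)} {c : Char} {rs : List Char}
    (hs : ∀ s ∈ seps, s ≠ []) (h0 : pvBMatch seps (c :: rs) = none) :
    pvAFind seps (c :: rs) = ((pvAFind seps rs).1, (pvAFind seps rs).2 + 1) := by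
  have hnp : ∀ s ∈ seps, ¬ s <+: (c :: rs) := by
    intro s hsmem hsp
    have := List.find?_eq_none.mp h0 s hsmem
    simp only [Bool.and_eq_true, Bool.not_eq_true'] at this
    exact this ⟨by simp [List.isEmpty_iff, hs s hsmem], (PySem.Chars.startswith_iff _ _).mpr hsp⟩
  have key : ∀ (sp : List (List Char)) (acc : Option (List Char) × Nat), (∀ s ∈ sp, ¬ s <+: (c :: rs)) →
      List.foldl (pvAStep (c :: rs)) (acc.1, acc.2 + 1) sp
        = ((List.foldl (pvAStep rs) acc sp).1, (List.foldl (pvAStep rs) acc sp).2 + 1) := by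
    intro sp
    induction sp with
    | nil => intro acc _; rfl
    | cons s sp ih =>
        intro acc hnps
        rw [List.foldl_cons, List.foldl_cons]
        have hstep : pvAStep (c :: rs) (acc.1, acc.2 + 1) s
            = ((pvAStep rs acc s).1, (pvAStep rs acc s).2 + 1) := by
          by_cases hin : PySem.Chars.isIn s rs = true
          · have hnn : 0 ≤ PySem.Chars.find rs s :=
              (PySem.Chars.find_nonneg_iff _ _).mpr ((PySem.Chars.isIn_iff_infix _ _).mp hin)
            obtain ⟨hpf, hm⟩ := PySem.Chars.find_spec hnn
            have hfind : PySem.Chars.find (c :: rs) s = ((PySem.Chars.find rs s).toNat + 1 : Nat) := by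
              refine pv_find_eq (by simpa using hpf) ?_
              intro i hi
              cases i with
              | zero => simpa using hnps s (by simp)
              | succ j => exact fun hpj => hm j (by omega) (by simpa using hpj)
            have hin' : PySem.Chars.isIn s (c :: rs) = true :=
              (PySem.Chars.exists_prefix_drop_iff_isIn _ _).mp ⟨(PySem.Chars.find rs s).toNat + 1, by simpa using hpf⟩
            simp only [pvAStep, hin, hin', if_true, hfind]
            have htn : (((PySem.Chars.find rs s).toNat + 1 : Nat) : Int).toNat = (PySem.Chars.find rs s).toNat + 1 := by omega
            rw [htn]
            have hminrw : min (acc.2 + 1) ((PySem.Chars.find rs s).toNat + 1)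
                = min acc.2 (PySem.Chars.find rs s).toNat + 1 := by omega
            rw [hminrw]
            by_cases hlt : min acc.2 (PySem.Chars.find rs s).toNat < acc.2
            · simp [hlt, Nat.add_lt_add_right hlt 1]
            · have : ¬ min acc.2 (PySem.Chars.find rs s).toNat + 1 < acc.2 + 1 := by omega
              simp [hlt, this]
          · have hin' : PySem.Chars.isIn s (c :: rs) = false := by
              rw [PySem.Chars.isIn_eq_false_iff]
              intro hinf
              rcases List.infix_cons_iff.mp hinf with hp | hi
              · exact hnps s (by simp) hp
              · exact ((PySem.Chars.isIn_eq_false_iff _ _).mp (Bool.eq_false_iff.mpr hin))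
                  (by exact hi)
            simp [pvAStep, hin', Bool.eq_false_iff.mpr hin]
        rw [hstep, ih _ (fun t ht => hnps t (by simp [ht]))]
  unfold pvAFind
  have := key seps (none, rs.length + 1) hnp
  simpa using this

-- A's inner loop finding (tpl, m) means: no separator matches before m, tpl is B's match at m
theorem pvAFind_charac {seps : List (List Char)} (hs : ∀ s ∈ seps, s ≠ []) :
    ∀ (line tpl : List Char) (m : Nat), pvAFind seps line = (some tpl, m) →
      pvBMatch seps (line.drop m) = some tpl ∧ ∀ i < m, pvBMatch seps (line.drop i) = none := by
  intro line
  induction line with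
  | nil =>
      intro tpl m h
      have : pvAFind seps [] = (none, 1) := by
        refine pvAFind_all_none _ _ (fun s hsm => ?_)
        rw [PySem.Chars.isIn_eq_false_iff]
        intro hinf
        exact hs s hsm (List.infix_nil.mp hinf)
      rw [this] at h
      simp at h
  | cons c rs ih =>
      intro tpl m h
      cases hb : pvBMatch seps (c :: rs) with
      | some t =>
          rw [pvAFind_head hs hb] at h
          obtain ⟨h1, h2⟩ := Prod.mk.inj h
          cases Option.some.inj h1
          cases h2
          exact ⟨by simpa using hb, fun i hi => absurd hi (by omega)⟩
      | none =>
          rw [pvAFind_tail hs hb] at h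
          cases hr : (pvAFind seps rs).1 with
          | none => rw [hr] at h; simp at h
          | some t =>
              have hfr : pvAFind seps rs = (some t, (pvAFind seps rs).2) := by
                rw [← hr]
              rw [hr] at h
              obtain ⟨h1', h2'⟩ := Prod.mk.inj h
              cases Option.some.inj h1'
              obtain ⟨h1, h2⟩ := ih tpl (pvAFind seps rs).2 hfr
              subst h2'
              constructor
              · simpa using h1
              · intro i hi
                cases i with
                | zero => simpa using hb
                | succ j => simpa using h2 j (by omega)

theorem pvBScan_nil (seps : List (List Char)) (cur : List Char) : pvBScan seps cur [] = [cur] := by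
  simp [pvBScan]

-- B's scan just swallows characters while no separator matches
theorem pvBScan_skip (seps : List (List Char)) :
    ∀ (m : Nat) (rest cur : List Char), (∀ i < m, pvBMatch seps (rest.drop i) = none) → m ≤ rest.length →
      pvBScan seps cur rest = pvBScan seps (cur ++ rest.take m) (rest.drop m) := by
  intro m
  induction m with
  | zero => intro rest cur _ _; simp
  | succ m ih =>
      intro rest cur h hlen
      cases rest with
      | nil => simp at hlen
      | cons c rs =>
          have h0 : pvBMatch seps (c :: rs) = none := by simpa using h 0 (by omega)
          rw [pvBScan, h0]
          have := ih rs (cur ++ [c]) (fun i hi => by simpa using h (i + 1) (by omega)) (by simpa using hlen)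
          rw [this]
          simp

theorem pvBScan_all_none (seps : List (List Char)) (rest cur : List Char)
    (h : ∀ i, pvBMatch seps (rest.drop i) = none) : pvBScan seps cur rest = [cur ++ rest] := by
  rw [pvBScan_skip seps rest.length rest cur (fun i _ => h i) le_rfl]
  simp [pvBScan_nil]

-- entries accumulate by appending: pull them out of A's while-loop
theorem pvALoop_acc (seps : List (List Char)) :
    ∀ (fuel : Nat) (line : List Char) (entries : List (List Char)) (mi : Nat),
      pvALoop seps fuel line entries mi
        = (entries ++ (pvALoop seps fuel line [] mi).1, (pvALoop seps fuel line [] mi).2) := by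
  intro fuel
  induction fuel with
  | zero => intro line entries mi; simp [pvALoop]
  | succ fuel ih =>
      intro line entries mi
      by_cases hl : line.length > 0
      · simp only [pvALoop, hl, if_true]
        cases hf : pvAFind seps line with
        | mk o m =>
            cases o with
            | none => simp
            | some tpl =>
                show pvALoop seps fuel (line.drop (m + tpl.length)) (entries ++ [line.take m]) m
                    = (entries ++ (pvALoop seps fuel (line.drop (m + tpl.length)) ([] ++ [line.take m]) m).1,
                       (pvALoop seps fuel (line.drop (m + tpl.length)) ([] ++ [line.take m]) m).2)
                rw [ih _ (entries ++ [line.take m]) m, ih _ ([] ++ [line.take m]) m]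
                simp
      · simp [pvALoop, hl]

-- the heart: A's loop (finished, filtered) = B's scan (filtered)
theorem pv_main {seps : List (List Char)} (hs : ∀ s ∈ seps, s ≠ []) :
    ∀ (n : Nat) (line : List Char) (fuel mi : Nat), line.length ≤ n → line.length < fuel →
      (pvAFinish (pvALoop seps fuel line [] mi)).filter (fun e => decide (e.length > 0))
        = (pvBScan seps [] line).filter (fun e => decide (e.length > 0)) := by
  intro n
  induction n with
  | zero =>
      intro line fuel mi hn hf
      have : line = [] := List.length_eq_zero_iff.mp (by omega)
      subst this
      obtain ⟨f, rfl⟩ : ∃ f, fuel = f + 1 := ⟨fuel - 1, by omega⟩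
      simp [pvALoop, pvAFinish, pvBScan_nil]
  | succ n ih =>
      intro line fuel mi hn hf
      cases hline : line with
      | nil =>
          obtain ⟨f, rfl⟩ : ∃ f, fuel = f + 1 := ⟨fuel - 1, by omega⟩
          simp [pvALoop, pvAFinish, pvBScan_nil]
      | cons c rs =>
          rw [← hline]
          have hlpos : line.length > 0 := by simp [hline]
          obtain ⟨f, rfl⟩ : ∃ f, fuel = f + 1 := ⟨fuel - 1, by omega⟩
          by_cases hall : ∀ s ∈ seps, PySem.Chars.isIn s line = false
          · -- no separator occurs: A emits the whole line, B swallows it all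
            have hAf : pvAFind seps line = (none, line.length + 1) := pvAFind_all_none _ _ hall
            have hA : pvALoop seps (f + 1) line [] mi = ([], line, line.length + 1) := by
              simp [pvALoop, hlpos, hAf]
            have hnomatch : ∀ i, pvBMatch seps (line.drop i) = none := by
              intro i
              rw [pvBMatch, List.find?_eq_none]
              intro s hsm hp
              simp only [Bool.and_eq_true, Bool.not_eq_true'] at hp
              have : PySem.Chars.isIn s line = true :=
                (PySem.Chars.exists_prefix_drop_iff_isIn _ _).mp ⟨i, (PySem.Chars.startswith_iff _ _).mp hp.2⟩
              rw [hall s hsm] at this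
              exact Bool.false_ne_true this
            rw [hA, pvBScan_all_none seps line [] hnomatch]
            simp [pvAFinish, hlpos, List.take_of_length_le (by omega : line.length ≤ line.length + 1)]
          · -- some separator occurs: both sides cut the same first token and recurse
            have hsome : (pvAFind seps line).1.isSome := by
              cases h1 : (pvAFind seps line).1 with
              | none => exact absurd (pvAFind_none seps line h1) hall
              | some t => simp
            obtain ⟨tpl, htpl⟩ := Option.isSome_iff_exists.mp hsome
            set m := (pvAFind seps line).2 with hm
            have hfind : pvAFind seps line = (some tpl, m) := by
              rw [hm]; exact Prod.ext htpl rfl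
            obtain ⟨hbm, hbefore⟩ := pvAFind_charac hs line tpl m hfind
            have htne : tpl ≠ [] := pvBMatch_some_ne hbm
            have htpre : tpl <+: line.drop m := by
              have := List.find?_some hbm
              simp only [Bool.and_eq_true, Bool.not_eq_true'] at this
              exact (PySem.Chars.startswith_iff _ _).mp this.2
            have hdropne : line.drop m ≠ [] := by
              intro hnil
              rw [hnil] at htpre
              exact htne (List.prefix_nil.mp htpre)
            have hmlt : m < line.length := by
              by_contra hge
              exact hdropne (List.drop_eq_nil_iff.mpr (by omega))
            have htlen : 1 ≤ tpl.length := List.length_pos_iff.mpr htne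
            -- A side: one loop iteration
            have hA : pvALoop seps (f + 1) line [] mi
                = ([line.take m] ++ (pvALoop seps f (line.drop (m + tpl.length)) [] m).1,
                   (pvALoop seps f (line.drop (m + tpl.length)) [] m).2) := by
              simp only [pvALoop, hlpos, if_true, hfind]
              exact pvALoop_acc seps f _ [line.take m] m
            have hAfin : pvAFinish (pvALoop seps (f + 1) line [] mi)
                = line.take m :: pvAFinish (pvALoop seps f (line.drop (m + tpl.length)) [] m) := by
              rw [hA]
              unfold pvAFinish
              by_cases hr : (pvALoop seps f (line.drop (m + tpl.length)) [] m).2.1.length > 0 <;> simp [hr]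
            -- B side: skip to m, cut there
            have hBcut : pvBScan seps [] line
                = line.take m :: pvBScan seps [] (line.drop (m + tpl.length)) := by
              rw [pvBScan_skip seps m line [] hbefore (by omega)]
              obtain ⟨d, ds, hds⟩ : ∃ d ds, line.drop m = d :: ds := by
                cases hdm : line.drop m with
                | nil => exact absurd hdm hdropne
                | cons d ds => exact ⟨d, ds, rfl⟩
              rw [hds] at hbm
              rw [hds, pvBScan]
              split
              · rename_i s' hmatch
                rw [hbm] at hmatch
                cases Option.some.inj hmatch
                rw [← hds, List.drop_drop]
                simp
              · rename_i hmatch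
                rw [hbm] at hmatch
                simp at hmatch
            rw [hAfin, hBcut, List.filter_cons, List.filter_cons]
            have hrec := ih (line.drop (m + tpl.length)) f m
              (by simp only [List.length_drop]; omega)
              (by simp only [List.length_drop]; omega)
            split <;> rw [hrec]

-- lift list-of-chars equality of tokens through the common cleanup pipeline
theorem pv_toplevel_eq {ts us : List (List Char)} (h : ts = us) (clean_comma : Bool) :
    ((if clean_comma then
        ts.map (fun e => if PySem.List.pyGet? e (-1) = some ',' then PySem.List.slice e none (some (-1)) else e)
      else ts).map (fun e => String.ofList e))
    = ((if clean_comma then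
        us.map (fun e => if PySem.List.pyGet? e (-1) = some ',' then PySem.List.slice e none (some (-1)) else e)
      else us).map (fun e => String.ofList e)) := by
  rw [h]

-- ===== VERDICT (by name: the statement is the Claim_ definition above) =====
theorem manual_terms_split_spec : Claim_equal_manual_terms_split := by
  intro line separators clean_comma clean_brackets _hdom hpre
  unfold Spec_manual_terms_split manual_terms_split manual_terms_split_alt
  have hs : ∀ s ∈ (match separators with | none => [" ", "_", "/"] | some l => l).map String.toList, s ≠ [] := by
    intro s hsm
    obtain ⟨t, htm, rfl⟩ := List.mem_map.mp hsm
    rw [ne_eq, String.toList_eq_nil_iff]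
    cases separators with
    | none =>
        have : t = " " ∨ t = "_" ∨ t = "/" := by simpa using htm
        rcases this with rfl | rfl | rfl <;> decide
    | some l =>
        exact hpre t (by simpa using htm)
  apply pv_toplevel_eq
  exact pv_main hs _ _ _ 0 le_rfl (by omega)
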